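-- pv_equiv track=rewrite | github.com/hongyan3/fuzz_platform | model/fuzzer/can_fuzz.py | apply_fuzzed_data
-- ===== SOURCE A (Python) =====
-- def apply_fuzzed_data(initial_data, fuzzed_data, bitmap):
--     fuzz_index = 0
--     fuzzed_data = fuzzed_data[::-1]
--     for index in range(0, len(initial_data)):
--         if bitmap[index]:
--             initial_data[index] = fuzzed_data[fuzz_index]
--             fuzz_index += 1
--     return initial_data
-- ===== SOURCE B (Python) =====
-- def apply_fuzzed_data(initial_data, fuzzed_data, bitmap):
--     stack = list(fuzzed_data)
--     out = [stack.pop() if flag else x for x, flag in zip(initial_data, bitmap)]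
--     initial_data[:] = out
--     return initial_data
-- ===== Notes on version B (the rewrite author's own statement) =====
-- stated objective: alternative
-- what changed: B never reverses the fuzz data and keeps no counter: it consumes fuzzed_data as a stack popped from its tail while building the output functionally over zip(initial_data, bitmap), then writes it back in place; A reverses first and indexes forward with a running fuzz_index.
import Mathlib
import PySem

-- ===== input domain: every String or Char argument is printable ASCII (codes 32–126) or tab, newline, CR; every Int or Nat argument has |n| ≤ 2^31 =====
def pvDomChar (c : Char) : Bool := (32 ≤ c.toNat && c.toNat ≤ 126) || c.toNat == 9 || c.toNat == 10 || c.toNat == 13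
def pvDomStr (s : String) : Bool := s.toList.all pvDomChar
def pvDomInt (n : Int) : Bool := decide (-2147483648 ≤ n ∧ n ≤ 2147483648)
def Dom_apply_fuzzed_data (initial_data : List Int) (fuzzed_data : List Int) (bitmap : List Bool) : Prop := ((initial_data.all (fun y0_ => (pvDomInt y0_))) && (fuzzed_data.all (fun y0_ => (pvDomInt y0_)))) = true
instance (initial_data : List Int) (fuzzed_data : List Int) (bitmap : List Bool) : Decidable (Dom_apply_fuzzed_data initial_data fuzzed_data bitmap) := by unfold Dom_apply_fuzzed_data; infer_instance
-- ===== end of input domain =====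

-- B consumes fuzzed_data as a stack popped from its tail (no reversal, no counter) while
-- building the output over zip(initial_data, bitmap) (objective: alternative). Both Pythons
-- mutate initial_data in place to the same final contents; the equivalence proved is about
-- the return value.

-- ===== PORT A =====
def apply_fuzzed_data (initial_data : List Int) (fuzzed_data : List Int) (bitmap : List Bool) : List Int :=
  let fd := (PySem.List.slice? fuzzed_data none none (-1)).getD []   -- fuzzed_data[::-1]
  let st := (PySem.List.pyRange 0 initial_data.length 1).foldl
    (fun (s : List Int × Int) index =>
      if PySem.List.pyGetD bitmap index false then
        (PySem.List.pySetD s.1 index (PySem.List.pyGetD fd s.2 0), s.2 + 1)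
      else s)
    (initial_data, 0)
  st.1

-- ===== PORT B =====
-- The zip-comprehension with a stateful stack.pop() is ported as the structural recursion
-- threading the stack; stack.pop() = getLastD/dropLast (default 0 only where Python raises,
-- which Pre_ excludes).
def pvAltGo (pairs : List (Int × Bool)) (stack : List Int) : List Int :=
  match pairs with
  | [] => []
  | (x, flag) :: rest =>
      if flag then stack.getLastD 0 :: pvAltGo rest stack.dropLast
      else x :: pvAltGo rest stack

def apply_fuzzed_data_alt (initial_data : List Int) (fuzzed_data : List Int) (bitmap : List Bool) : List Int :=
  pvAltGo (initial_data.zip bitmap) fuzzed_data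

-- ===== PRECONDITION & SPEC =====
-- Pre_ excludes exactly the inputs where the Python A raises IndexError: a bitmap shorter
-- than initial_data, or fewer fuzzed bytes than set bitmap bits over initial_data's indices.
def Pre_apply_fuzzed_data (initial_data : List Int) (fuzzed_data : List Int) (bitmap : List Bool) : Prop :=
  initial_data.length ≤ bitmap.length ∧
  ((bitmap.take initial_data.length).count true) ≤ fuzzed_data.length
instance (initial_data : List Int) (fuzzed_data : List Int) (bitmap : List Bool) : Decidable (Pre_apply_fuzzed_data initial_data fuzzed_data bitmap) := by unfold Pre_apply_fuzzed_data; infer_instance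
def pvWitness_apply_fuzzed_data : List Int × List Int × List Bool := ([1, 2, 3], [10, 20], [true, false, true])

def Spec_apply_fuzzed_data (initial_data : List Int) (fuzzed_data : List Int) (bitmap : List Bool) (out : List Int) : Prop := out = apply_fuzzed_data_alt initial_data fuzzed_data bitmap
instance (initial_data : List Int) (fuzzed_data : List Int) (bitmap : List Bool) (out : List Int) : Decidable (Spec_apply_fuzzed_data initial_data fuzzed_data bitmap out) := by unfold Spec_apply_fuzzed_data; infer_instance

-- ===== CLAIM (what is proved, stated in full; the proofs are below) =====
def Claim_equal_apply_fuzzed_data : Prop := ∀ (initial_data : List Int) (fuzzed_data : List Int) (bitmap : List Bool), Dom_apply_fuzzed_data initial_data fuzzed_data bitmap → Pre_apply_fuzzed_data initial_data fuzzed_data bitmap → Spec_apply_fuzzed_data initial_data fuzzed_data bitmap (apply_fuzzed_data initial_data fuzzed_data bitmap)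
-- ===== LEMMAS AND PROOFS =====

-- Proof-only middle form: A's loop body written as structural recursion on the
-- data/bitmap pairs, reading the reversed fuzz list at index fi.
def pvMidRec (pairs : List (Int × Bool)) (rev : List Int) (fi : Int) : List Int :=
  match pairs with
  | [] => []
  | (x, flag) :: rest =>
      if flag then PySem.List.pyGetD rev fi 0 :: pvMidRec rest rev (fi + 1)
      else x :: pvMidRec rest rev fi

-- B's stack form equals the middle form: after k pops the stack is (rev.drop k).reverse.
theorem altGo_eq_midRec (rev : List Int) :
    ∀ (pairs : List (Int × Bool)) (k : Nat),
      pvAltGo pairs ((rev.drop k).reverse) = pvMidRec pairs rev (k : Int) := by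
  intro pairs
  induction pairs with
  | nil => intro k; simp [pvAltGo, pvMidRec]
  | cons hd tl ih =>
      intro k
      obtain ⟨x, flag⟩ := hd
      by_cases h : flag = true
      · have hlast : ((rev.drop k).reverse).getLastD 0 = PySem.List.pyGetD rev (k : Int) 0 := by
          simp [List.getLastD_eq_getLast?, List.getLast?_reverse, List.head?_drop,
                PySem.List.pyGetD_natCast, List.getD]
        have hdrop : ((rev.drop k).reverse).dropLast = (rev.drop (k + 1)).reverse := by
          rw [List.dropLast_reverse, List.tail_drop]
        have hk : ((k : Int) + 1) = ((k + 1 : Nat) : Int) := by push_cast; ring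
        rw [pvAltGo, pvMidRec]
        simp only [h, if_true, hlast, hdrop, hk, ih (k + 1)]
      · rw [pvAltGo, pvMidRec]
        simp [h, ih k]

-- A's index loop equals the middle form, by induction on the unprocessed suffix with the
-- processed prefix generalized.
theorem aLoop_eq_midRec (bs : List Bool) (rev : List Int) :
    ∀ (data pre : List Int) (fi : Int),
      pre.length + data.length ≤ bs.length →
      ((PySem.List.pyRange (pre.length) (pre.length + data.length) 1).foldl
        (fun (s : List Int × Int) index =>
          if PySem.List.pyGetD bs index false then
            (PySem.List.pySetD s.1 index (PySem.List.pyGetD rev s.2 0), s.2 + 1)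
          else s)
        (pre ++ data, fi)).1
      = pre ++ pvMidRec (data.zip (bs.drop pre.length)) rev fi := by
  intro data
  induction data with
  | nil =>
      intro pre fi _
      rw [PySem.List.pyRange_one_eq_nil (by simp)]
      simp [pvMidRec]
  | cons x xs ih =>
      intro pre fi hlen
      have hpre : (pre.length : Int) < pre.length + (x :: xs).length := by
        simp
      rw [PySem.List.pyRange_one_cons hpre]
      have hblen : pre.length < bs.length := by simp at hlen; omega
      have hbget : PySem.List.pyGetD bs (pre.length : Int) false = bs[pre.length] := by
        simp [PySem.List.pyGetD_natCast, List.getD, List.getElem?_eq_getElem hblen]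
      have hdropbs : bs.drop pre.length = bs[pre.length] :: bs.drop (pre.length + 1) := by
        rw [List.drop_eq_getElem_cons hblen]
      rw [List.foldl_cons, hbget]
      have hbounds : (pre.length : Int) + 1 + (xs.length : Int)
          = (pre.length : Int) + ((x :: xs).length : Int) := by simp; ring
      by_cases hb : bs[pre.length] = true
      · rw [if_pos hb]
        have hset : PySem.List.pySetD (pre ++ x :: xs) (pre.length : Int)
            (PySem.List.pyGetD rev fi 0) = (pre ++ [PySem.List.pyGetD rev fi 0]) ++ xs := by
          rw [PySem.List.pySetD_natCast]
          simp
        rw [hset]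
        have := ih (pre ++ [PySem.List.pyGetD rev fi 0]) (fi + 1)
          (by simp at hlen ⊢; omega)
        simp only [List.length_append, List.length_singleton, Nat.cast_add, Nat.cast_one] at this
        rw [hbounds] at this
        rw [hdropbs]
        simp only [List.zip_cons_cons, pvMidRec, hb, if_true]
        simpa using this
      · rw [if_neg (by simp [hb])]
        have hsplit : pre ++ x :: xs = (pre ++ [x]) ++ xs := by simp
        rw [hsplit]
        have := ih (pre ++ [x]) fi (by simp at hlen ⊢; omega)
        simp only [List.length_append, List.length_singleton, Nat.cast_add, Nat.cast_one] at this
        rw [hbounds] at this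
        rw [hdropbs]
        simp only [List.zip_cons_cons, pvMidRec, hb, if_false, Bool.false_eq_true]
        simpa using this

-- ===== VERDICT (by name: the statement is the Claim_ definition above) =====
theorem apply_fuzzed_data_spec : Claim_equal_apply_fuzzed_data := by
  intro initial_data fuzzed_data bitmap _ hpre
  unfold Spec_apply_fuzzed_data apply_fuzzed_data apply_fuzzed_data_alt
  simp only [PySem.List.slice?_none_none_neg_one, Option.getD_some]
  have hA := aLoop_eq_midRec bitmap fuzzed_data.reverse initial_data [] 0 (by simpa using hpre.1)
  simp only [List.length_nil, List.nil_append, List.drop_zero, Nat.cast_zero, Int.zero_add] at hA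
  have hB := altGo_eq_midRec fuzzed_data.reverse (initial_data.zip bitmap) 0
  simp only [List.drop_zero, List.reverse_reverse, Nat.cast_zero] at hB
  rw [hB]
  simpa using hA
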